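-- pv_equiv track=rewrite | github.com/koyo922/leetcode | p216_comb_sum3.py | using_reduce
-- ===== SOURCE A (Python) =====
-- def using_reduce(k, n):
--     """ 同上，用reduce写成一行 """
--     from functools import reduce
--     return [c for c in
--             reduce(  # 三个参数分别是 function, sequence, initial; 但是不支持具名
--                 lambda combs, _: [[first] + comb
--                                   for comb in combs
--                                   for first in range(1, comb[0])],
--                 range(k - 1),
--                 [[d] for d in range(1, 10)],
--             )
--             if sum(c) == n]
-- ===== SOURCE B (Python) =====
-- def using_reduce(k, n):
--     """Pruned DFS over the maximum digit instead of build-all-then-filter.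
--
--     dfs(k, n, hi) returns the strictly increasing k-combinations of digits
--     in 1..hi summing to n, enumerated by maximum element ascending (the
--     same order A's reduce produces). k <= 1 is treated as a single digit,
--     matching A (whose reduce runs zero times for k <= 1).
--     """
--     def dfs(k, n, hi):
--         if k <= 1:
--             return [[n]] if 1 <= n <= hi else []
--         out = []
--         for m in range(k, hi + 1):
--             for rest in dfs(k - 1, n - m, m - 1):
--                 out.append(rest + [m])
--         return out
--     return dfs(k, n, 9)
-- ===== Notes on version B (the rewrite author's own statement) =====
-- stated objective: faster
-- what changed: Replaces the reduce that runs k-1 fold steps materialising every increasing digit combination of 1..9 and then filters by sum with a recursive DFS on the maximum digit, pruned by remaining sum and count, producing the same lists in the same max-ascending order.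
import Mathlib
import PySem

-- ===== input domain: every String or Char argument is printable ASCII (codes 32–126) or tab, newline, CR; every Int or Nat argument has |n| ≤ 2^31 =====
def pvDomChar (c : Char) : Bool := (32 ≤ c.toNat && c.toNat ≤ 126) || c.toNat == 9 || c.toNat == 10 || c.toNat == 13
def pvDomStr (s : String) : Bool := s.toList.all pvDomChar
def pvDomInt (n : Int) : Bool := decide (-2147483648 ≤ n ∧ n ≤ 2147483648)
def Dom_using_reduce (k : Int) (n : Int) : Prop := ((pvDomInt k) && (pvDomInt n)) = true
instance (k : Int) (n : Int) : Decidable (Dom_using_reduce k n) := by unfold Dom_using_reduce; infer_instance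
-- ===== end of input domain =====

-- B replaces A's build-all-then-filter reduce by a sum/count-pruned DFS on the maximum digit (same lists, same order).

-- ===== PORT A =====
-- sum(c) in Python is a left fold starting at 0
def pySum (c : List Int) : Int := c.foldl (· + ·) 0

-- inner comprehension of the reduce lambda for one comb: [[first] + comb for first in range(1, comb[0])];
-- comb[0]: every comb reached is nonempty, so the .getD 0 default is unreachable
def prepA (comb : List Int) : List (List Int) :=
  (PySem.List.pyRange 1 ((PySem.List.pyGet? comb 0).getD 0) 1).map (fun first => first :: comb)

-- the reduce lambda's body: [[first] + comb for comb in combs for first in range(1, comb[0])]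
def aStep (combs : List (List Int)) : List (List Int) := combs.flatMap prepA

def using_reduce (k : Int) (n : Int) : List (List Int) :=
  ((PySem.List.pyRange 0 (k - 1) 1).foldl (fun combs _ => aStep combs)
      ((PySem.List.pyRange 1 10 1).map (fun d => [d]))).filter (fun c => pySum c == n)

-- ===== PORT B =====
def dfsB (k : Int) (n : Int) (hi : Int) : List (List Int) :=
  if k ≤ 1 then (if 1 ≤ n ∧ n ≤ hi then [[n]] else [])
  else (PySem.List.pyRange k (hi + 1) 1).flatMap
    (fun m => (dfsB (k - 1) (n - m) (m - 1)).map (fun rest => rest ++ [m]))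
termination_by k.toNat
decreasing_by omega

def using_reduce_alt (k : Int) (n : Int) : List (List Int) := dfsB k n 9

-- ===== PRECONDITION & SPEC =====
def Spec_using_reduce (k : Int) (n : Int) (out : List (List Int)) : Prop := out = using_reduce_alt k n
instance (k : Int) (n : Int) (out : List (List Int)) : Decidable (Spec_using_reduce k n out) := by unfold Spec_using_reduce; infer_instance

-- ===== CLAIM (what is proved, stated in full; the proofs are below) =====
def Claim_equal_using_reduce : Prop := ∀ (k : Int) (n : Int), Dom_using_reduce k n → Spec_using_reduce k n (using_reduce k n)

-- ===== LEMMAS AND PROOFS =====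

-- canonical enumeration: strictly increasing j-lists over 1..hi, by maximum element ascending
def combsC : Nat → Int → List (List Int)
  | 0, _ => [[]]
  | j+1, hi => (PySem.List.pyRange 1 (hi+1) 1).flatMap
      (fun m => (combsC j (m-1)).map (fun rest => rest ++ [m]))

theorem flatMap_single_map {α β : Type} (f : α → β) (l : List α) : (l.flatMap fun x => [f x]) = l.map f := by
  induction l with
  | nil => rfl
  | cons a l ih => simp [ih]

theorem combsC_ne_nil (j : Nat) (hi : Int) (c : List Int) (hc : c ∈ combsC (j+1) hi) : c ≠ [] := by
  simp only [combsC, List.mem_flatMap, List.mem_map] at hc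
  obtain ⟨m, _, rest, _, rfl⟩ := hc
  simp

theorem prep_append (x : List Int) (m : Int) (hx : x ≠ []) :
    prepA (x ++ [m]) = (prepA x).map (fun c => c ++ [m]) := by
  obtain ⟨a, x', rfl⟩ := List.exists_cons_of_ne_nil hx
  simp [prepA, PySem.List.pyGet?_zero, List.map_map, Function.comp]

theorem aStep_combsC (j : Nat) : ∀ hi : Int, aStep (combsC (j+1) hi) = combsC (j+2) hi := by
  induction j with
  | zero =>
    intro hi
    show (combsC 1 hi).flatMap prepA = combsC 2 hi
    rw [show combsC 1 hi = (PySem.List.pyRange 1 (hi+1) 1).flatMap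
          (fun m => (combsC 0 (m-1)).map (fun rest => rest ++ [m])) from rfl,
        show combsC 2 hi = (PySem.List.pyRange 1 (hi+1) 1).flatMap
          (fun m => (combsC 1 (m-1)).map (fun rest => rest ++ [m])) from rfl,
        List.flatMap_assoc]
    refine List.flatMap_congr (fun m _ => ?_)
    simp only [combsC, List.map_nil, List.map_cons, List.nil_append, List.flatMap_singleton]
    simp [prepA, sub_add_cancel, flatMap_single_map, List.map_map, Function.comp]
  | succ j ih =>
    intro hi
    show (combsC (j+1+1) hi).flatMap prepA = combsC (j+1+2) hi
    rw [show combsC (j+1+1) hi = (PySem.List.pyRange 1 (hi+1) 1).flatMap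
          (fun m => (combsC (j+1) (m-1)).map (fun rest => rest ++ [m])) from rfl,
        show combsC (j+1+2) hi = (PySem.List.pyRange 1 (hi+1) 1).flatMap
          (fun m => (combsC (j+2) (m-1)).map (fun rest => rest ++ [m])) from rfl,
        List.flatMap_assoc]
    refine List.flatMap_congr (fun m _ => ?_)
    rw [List.flatMap_map]
    have h1 : (combsC (j+1) (m-1)).flatMap (fun rest => prepA (rest ++ [m]))
        = (combsC (j+1) (m-1)).flatMap (fun rest => (prepA rest).map (fun c => c ++ [m])) :=
      List.flatMap_congr (fun rest hr => prep_append rest m (combsC_ne_nil j (m-1) rest hr))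
    rw [h1, ← List.map_flatMap]
    have h2 : (combsC (j+1) (m-1)).flatMap prepA = combsC (j+2) (m-1) := ih (m-1)
    rw [h2]

theorem foldl_aStep (l : List Int) : ∀ (j : Nat) (hi : Int),
    l.foldl (fun c _ => aStep c) (combsC (j+1) hi) = combsC (j+1+l.length) hi := by
  induction l with
  | nil => intro j hi; simp
  | cons a l ih =>
    intro j hi
    simp only [List.foldl_cons, List.length_cons]
    have h1 : aStep (combsC (j+1) hi) = combsC (j+1+1) hi := aStep_combsC j hi
    rw [h1, ih (j+1) hi]
    congr 1
    omega

theorem combsC_nil (j : Nat) : ∀ hi : Int, hi ≤ (j : Int) → combsC (j+1) hi = [] := by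
  induction j with
  | zero =>
    intro hi h
    show combsC 1 hi = []
    rw [show combsC 1 hi = (PySem.List.pyRange 1 (hi+1) 1).flatMap
          (fun m => (combsC 0 (m-1)).map (fun rest => rest ++ [m])) from rfl,
        PySem.List.pyRange_one_eq_nil (by omega : hi+1 ≤ 1)]
    rfl
  | succ j ih =>
    intro hi h
    show combsC (j+1+1) hi = []
    rw [show combsC (j+1+1) hi = (PySem.List.pyRange 1 (hi+1) 1).flatMap
          (fun m => (combsC (j+1) (m-1)).map (fun rest => rest ++ [m])) from rfl,
        List.flatMap_eq_nil_iff]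
    intro m hm
    rw [PySem.List.mem_pyRange_one] at hm
    rw [ih (m-1) (by push_cast at h ⊢; omega)]
    rfl

theorem beq_shift (a b c : Int) : (a + c == b) = (a == b - c) := by
  by_cases h : a + c = b
  · have h2 : a = b - c := by omega
    simp [h2]
  · have h2 : a ≠ b - c := by omega
    simp [show a + c ≠ b from h, h2]

theorem filter_pyRange_beq (n : Int) : ∀ (t : Nat) (a b : Int), (b - a).toNat = t →
    (PySem.List.pyRange a b 1).filter (fun m => m == n) = if a ≤ n ∧ n < b then [n] else [] := by
  intro t
  induction t with
  | zero =>
    intro a b h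
    rw [PySem.List.pyRange_one_eq_nil (by omega), List.filter_nil, if_neg (by omega)]
  | succ t ih =>
    intro a b h
    rw [PySem.List.pyRange_one_cons (by omega), List.filter_cons, ih (a+1) b (by omega)]
    by_cases hc : a = n
    · subst hc
      simp only [beq_self_eq_true, if_true]
      rw [if_neg (show ¬((a:Int)+1 ≤ a ∧ a < b) by omega),
          if_pos (show a ≤ a ∧ a < b by omega)]
    · rw [if_neg (by simp [hc])]
      split_ifs <;> first | rfl | omega

theorem combsC_one (hi : Int) :
    combsC 1 hi = (PySem.List.pyRange 1 (hi+1) 1).map (fun d => [d]) := by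
  rw [show combsC 1 hi = (PySem.List.pyRange 1 (hi+1) 1).flatMap
        (fun m => (combsC 0 (m-1)).map (fun rest => rest ++ [m])) from rfl]
  simp [combsC, flatMap_single_map]

theorem filter_singletons (b n : Int) :
    ((PySem.List.pyRange 1 b 1).map (fun d => [d])).filter (fun c => pySum c == n)
      = if 1 ≤ n ∧ n < b then [[n]] else [] := by
  rw [List.filter_map]
  have hp : ((fun c => pySum c == n) ∘ fun d => [d]) = fun d => d == n := by
    funext d; simp [Function.comp, pySum]
  rw [hp, filter_pyRange_beq n ((b-1).toNat) 1 b rfl]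
  split_ifs <;> simp

theorem dfsB_eq (j : Nat) : ∀ (n hi : Int),
    dfsB ((j : Int) + 1) n hi = (combsC (j+1) hi).filter (fun c => pySum c == n) := by
  induction j with
  | zero =>
    intro n hi
    rw [show ((0:Nat):Int) + 1 = 1 from by norm_num, dfsB, if_pos (le_refl (1:Int)),
        combsC_one hi, filter_singletons (hi+1) n]
    split_ifs <;> first | rfl | omega
  | succ j ih =>
    intro n hi
    have hGrw : ∀ m : Int, ((combsC (j+1) (m-1)).map (fun rest => rest ++ [m])).filter (fun c => pySum c == n)
        = (dfsB ((j:Int)+1) (n-m) (m-1)).map (fun rest => rest ++ [m]) := by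
      intro m
      rw [List.filter_map]
      have hp : ((fun c => pySum c == n) ∘ fun rest => rest ++ [m]) = fun rest => pySum rest == n - m := by
        funext rest
        simp only [Function.comp, pySum, List.foldl_append, List.foldl_cons, List.foldl_nil]
        exact beq_shift _ n m
      rw [hp, ← ih (n-m) (m-1)]
    have hemp : ∀ m : Int, 1 ≤ m → m ≤ (j:Int)+1 →
        (dfsB ((j:Int)+1) (n-m) (m-1)).map (fun rest => rest ++ [m]) = ([] : List (List Int)) := by
      intro m h1 h2
      rw [ih (n-m) (m-1), combsC_nil j (m-1) (by omega), List.filter_nil, List.map_nil]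
    rw [show ((j+1:Nat):Int) + 1 = ((j:Int)+1)+1 from by push_cast; ring, dfsB,
        if_neg (by omega : ¬((j:Int)+1+1 ≤ 1))]
    simp only [add_sub_cancel_right]
    rw [show combsC (j+1+1) hi = (PySem.List.pyRange 1 (hi+1) 1).flatMap
          (fun m => (combsC (j+1) (m-1)).map (fun rest => rest ++ [m])) from rfl,
        List.filter_flatMap]
    simp only [hGrw]
    by_cases hcmp : ((j:Int)+1)+1 ≤ hi+1
    · conv_rhs => rw [PySem.List.pyRange_one_append 1 (((j:Int)+1)+1) (hi+1) (by omega) hcmp]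
      rw [List.flatMap_append]
      have hnil : (PySem.List.pyRange 1 (((j:Int)+1)+1) 1).flatMap
          (fun m => (dfsB ((j:Int)+1) (n-m) (m-1)).map (fun rest => rest ++ [m])) = [] := by
        rw [List.flatMap_eq_nil_iff]
        intro m hm
        rw [PySem.List.mem_pyRange_one] at hm
        exact hemp m hm.1 (by omega)
      rw [hnil, List.nil_append]
    · rw [PySem.List.pyRange_one_eq_nil (by omega : hi+1 ≤ ((j:Int)+1)+1)]
      rw [List.flatMap_nil]
      symm
      rw [List.flatMap_eq_nil_iff]
      intro m hm
      rw [PySem.List.mem_pyRange_one] at hm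
      exact hemp m hm.1 (by omega)

-- ===== VERDICT (by name: the statement is the Claim_ definition above) =====
theorem using_reduce_spec : Claim_equal_using_reduce := by
  intro k n _
  unfold Spec_using_reduce using_reduce using_reduce_alt
  by_cases hk : k ≤ 1
  · rw [PySem.List.pyRange_one_eq_nil (by omega : k - 1 ≤ 0)]
    simp only [List.foldl_nil]
    rw [dfsB, if_pos hk, filter_singletons 10 n]
    split_ifs <;> first | rfl | omega
  · obtain ⟨j, rfl⟩ : ∃ j : Nat, k = (j : Int) + 1 := ⟨(k-1).toNat, by omega⟩
    rw [show (PySem.List.pyRange 1 10 1).map (fun d => [d]) = combsC 1 9 from by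
          rw [combsC_one]; norm_num]
    have hA := foldl_aStep (PySem.List.pyRange 0 ((j:Int) + 1 - 1) 1) 0 9
    norm_num at hA
    rw [show 1 + j = j + 1 from by omega] at hA
    simp only [add_sub_cancel_right]
    rw [hA, dfsB_eq j n 9]
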